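-- pv_equiv track=rewrite | github.com/willnien10005914/VPA | tf.py | row_sum_check
-- ===== SOURCE A (Python) =====
-- def row_sum_check(data):
--     r_len = len(data)
--     c_len = len(data[0])
--
--     ret = [0,]*r_len
--     i = 0
--
--     for r in range(r_len):
--         for c in range(c_len):
--             ret[i] += data[r][c]
--         i += 1
--
--
--     for i in range(len(ret) - 1):
--         if ret[i] != ret[i+1]:
--             return False
--     return True
-- ===== SOURCE B (Python) =====
-- def row_sum_check(data):
--     width = len(data[0])
--     target = sum(data[0])
--     for row in data[1:]:
--         if sum(row[:width]) != target:
--             return False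
--     return True
-- ===== Notes on version B (the rewrite author's own statement) =====
-- stated objective: simpler
-- what changed: Replaces A's build-a-table-of-row-sums-then-scan-adjacent-pairs (two index loops plus an intermediate ret list) with a single streaming pass comparing each remaining row's sum over the first len(data[0]) columns against the first row's sum, exiting early on the first mismatch.
import Mathlib
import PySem

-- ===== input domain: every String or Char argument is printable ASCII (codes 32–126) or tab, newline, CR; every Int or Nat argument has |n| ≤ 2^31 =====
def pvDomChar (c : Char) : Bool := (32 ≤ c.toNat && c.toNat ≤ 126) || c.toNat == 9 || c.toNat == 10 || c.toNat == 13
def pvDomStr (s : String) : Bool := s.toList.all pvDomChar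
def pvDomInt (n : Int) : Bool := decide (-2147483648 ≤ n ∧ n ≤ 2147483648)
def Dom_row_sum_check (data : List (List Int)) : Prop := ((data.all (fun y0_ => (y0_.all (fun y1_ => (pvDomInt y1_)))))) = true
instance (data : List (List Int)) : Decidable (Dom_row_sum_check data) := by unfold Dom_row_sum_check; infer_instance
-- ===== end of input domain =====

-- B replaces A's build-a-table-of-row-sums-then-scan-adjacent-pairs with a single
-- streaming pass comparing each remaining row's sum over the first len(data[0]) columns
-- against the first row's sum, exiting early on the first mismatch (simpler).

-- ===== PORT A =====
-- second loop of A: 'for i in range(len(ret)-1): if ret[i] != ret[i+1]: return False' / 'return True'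
def rowScan (ret : List Int) : List Int → Bool
  | [] => true
  | i :: is =>
      if PySem.List.pyGetD ret i 0 ≠ PySem.List.pyGetD ret (i + 1) 0 then false
      else rowScan ret is

def row_sum_check (data : List (List Int)) : Bool :=
  let r_len : Int := data.length
  let c_len : Int := (PySem.List.pyGetD data 0 []).length   -- len(data[0]); Pre_ excludes empty data
  let st :=
    (PySem.List.pyRange 0 r_len 1).foldl
      (fun (st : List Int × Int) r =>
        let st :=
          (PySem.List.pyRange 0 c_len 1).foldl
            (fun (st : List Int × Int) c =>
              -- ret[i] += data[r][c]   (Pre_ keeps every index in range)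
              (PySem.List.pySetD st.1 st.2
                 (PySem.List.pyGetD st.1 st.2 0
                    + PySem.List.pyGetD (PySem.List.pyGetD data r []) c 0),
               st.2))
            st
        (st.1, st.2 + 1))
      (List.replicate r_len.toNat 0, (0 : Int))
  rowScan st.1 (PySem.List.pyRange 0 ((st.1.length : Int) - 1) 1)

-- ===== PORT B =====
-- 'for row in data[1:]: if sum(row[:width]) != target: return False' / 'return True'
def altGo (target : Int) (width : Int) : List (List Int) → Bool
  | [] => true
  | row :: rows =>
      if (PySem.List.slice row none (some width)).foldl (· + ·) 0 ≠ target then false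
      else altGo target width rows

def row_sum_check_alt (data : List (List Int)) : Bool :=
  let width : Int := (PySem.List.pyGetD data 0 []).length       -- len(data[0]); Pre_ excludes empty data
  let target := (PySem.List.pyGetD data 0 []).foldl (· + ·) 0   -- sum(data[0])
  altGo target width (PySem.List.slice data (some 1) none)      -- data[1:]

-- ===== PRECONDITION & SPEC =====
-- Pre_ excludes exactly the inputs on which A raises IndexError: empty data (data[0]) and
-- data in which some row is shorter than the first (data[r][c] out of range); B returns a
-- value on the latter. Both programs use the first row's length as the matrix width and
-- ignore any extra entries in longer rows.
def Pre_row_sum_check (data : List (List Int)) : Prop :=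
  data ≠ [] ∧ ∀ row ∈ data, (data.headD []).length ≤ row.length
instance (data : List (List Int)) : Decidable (Pre_row_sum_check data) := by
  unfold Pre_row_sum_check; infer_instance

def pvWitness_row_sum_check : List (List Int) := [[1, 2], [3, 0]]

def Spec_row_sum_check (data : List (List Int)) (out : Bool) : Prop := out = row_sum_check_alt data
instance (data : List (List Int)) (out : Bool) : Decidable (Spec_row_sum_check data out) := by
  unfold Spec_row_sum_check; infer_instance

-- ===== CLAIM (what is proved, stated in full; the proofs are below) =====
def Claim_equal_row_sum_check : Prop := ∀ (data : List (List Int)), Dom_row_sum_check data → Pre_row_sum_check data → Spec_row_sum_check data (row_sum_check data)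

-- ===== LEMMAS AND PROOFS =====

-- a fold whose state is a pair with constant second component
theorem pv_pairfold {β : Type} (l : List β) (g : List Int → Int → β → List Int) :
    ∀ (r : List Int) (i : Int),
      l.foldl (fun (st : List Int × Int) c => (g st.1 st.2 c, st.2)) (r, i)
        = (l.foldl (fun r c => g r i c) r, i) := by
  induction l with
  | nil => intro r i; rfl
  | cons c cs ih => intro r i; simp only [List.foldl_cons]; exact ih _ _

theorem pv_getD_set_self (l : List Int) (j : Nat) (x : Int) (h : j < l.length) :
    (l.set j x).getD j 0 = x := by
  simp [List.getD_eq_getElem?_getD, h]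

theorem pv_set_getD_self (l : List Int) (j : Nat) (h : j < l.length) :
    l.set j (l.getD j 0) = l := by
  have : l.getD j 0 = l[j] := by simp [List.getD_eq_getElem?_getD, List.getElem?_eq_getElem h]
  rw [this, List.set_getElem_self]

-- repeatedly adding the elements of row into slot j is one addition of its sum
theorem pv_foldl_set_add (row : List Int) :
    ∀ (ret : List Int) (j : Nat), j < ret.length →
      row.foldl (fun r v => r.set j (r.getD j 0 + v)) ret
        = ret.set j (ret.getD j 0 + row.sum) := by
  induction row with
  | nil =>
    intro ret j h
    simpa using (pv_set_getD_self ret j h).symm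
  | cons v vs ih =>
    intro ret j h
    simp only [List.foldl_cons, List.sum_cons]
    rw [ih _ j (by simpa using h)]
    rw [pv_getD_set_self _ _ _ h, List.set_set]
    congr 1
    ring

theorem pv_getD_append_mid (pre rest : List Int) (x : Int) :
    (pre ++ x :: rest).getD pre.length 0 = x := by
  simp [List.getD_eq_getElem?_getD]

theorem pv_set_append_mid (pre rest : List Int) (x y : Int) :
    (pre ++ x :: rest).set pre.length y = pre ++ y :: rest := by
  rw [List.set_append]; simp

theorem pv_pyGetD_take (row : List Int) (n : Nat) (c : Int) (h0 : 0 ≤ c) (hn : c < (n : Int)) :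
    PySem.List.pyGetD row c 0 = PySem.List.pyGetD (row.take n) c 0 := by
  rw [PySem.List.pyGetD_of_nonneg _ _ h0, PySem.List.pyGetD_of_nonneg _ _ h0]
  simp [List.getD_eq_getElem?_getD, show c.toNat < n by omega]

-- the whole first (nested) loop of A: ret becomes the list of per-row sums over the first
-- n = len(data[0]) columns, i the row count
theorem pv_outer (n : Nat) :
    ∀ (rows : List (List Int)) (pre : List Int),
      (∀ row ∈ rows, n ≤ row.length) →
      rows.foldl
        (fun (st : List Int × Int) row =>
          let st :=
            (PySem.List.pyRange 0 (n : Int) 1).foldl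
              (fun (st : List Int × Int) c =>
                (PySem.List.pySetD st.1 st.2
                   (PySem.List.pyGetD st.1 st.2 0 + PySem.List.pyGetD row c 0),
                 st.2))
              st
          (st.1, st.2 + 1))
        (pre ++ List.replicate rows.length 0, (pre.length : Int))
      = (pre ++ rows.map (fun row => (row.take n).sum), ((pre.length + rows.length : Nat) : Int)) := by
  intro rows
  induction rows with
  | nil => intro pre h; simp
  | cons row rest ih =>
    intro pre h
    have hrow : n ≤ row.length := h row (by simp)
    simp only [List.length_cons, List.replicate_succ, List.foldl_cons]
    rw [pv_pairfold _ (fun r i c =>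
          PySem.List.pySetD r i (PySem.List.pyGetD r i 0 + PySem.List.pyGetD row c 0))]
    simp only [PySem.List.pySetD_natCast, PySem.List.pyGetD_natCast]
    have htake : (row.take n).length = n := by simp [List.length_take]; omega
    have hstep : (PySem.List.pyRange 0 (n : Int) 1).foldl
        (fun (r : List Int) (c : Int) =>
          r.set pre.length (r.getD pre.length 0 + PySem.List.pyGetD row c 0))
        (pre ++ 0 :: List.replicate rest.length 0)
        = pre ++ (row.take n).sum :: List.replicate rest.length 0 := by
      rw [PySem.List.foldl_congr_mem _ _
            (fun (r : List Int) (c : Int) =>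
              r.set pre.length (r.getD pre.length 0 + PySem.List.pyGetD (row.take n) c 0)) _
            (fun r c hc => by
              have hmem := PySem.List.mem_pyRange_one.mp hc
              rw [pv_pyGetD_take row n c hmem.1 hmem.2])]
      rw [show (n : Int) = ((row.take n).length : Int) from by exact_mod_cast htake.symm]
      rw [PySem.List.foldl_pyRange_zero_pyGetD' (row.take n) 0
            (fun (r : List Int) (v : Int) => r.set pre.length (r.getD pre.length 0 + v))]
      rw [pv_foldl_set_add (row.take n) _ pre.length (by simp)]
      rw [pv_getD_append_mid, pv_set_append_mid, zero_add]
    rw [hstep]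
    rw [List.append_cons pre (row.take n).sum (List.replicate rest.length 0)]
    have hlen : ((pre.length : Int) + 1) = (((pre ++ [(row.take n).sum]).length : Nat) : Int) := by
      simp
    rw [hlen, ih (pre ++ [(row.take n).sum]) (fun r hr => h r (by simp [hr]))]
    simp only [List.length_append, List.append_assoc, List.singleton_append, List.map_cons,
      List.length_singleton]
    rw [show pre.length + 1 + rest.length = pre.length + (rest.length + 1) from by omega]

theorem pv_pyGetD_cons_succ (z : Int) (s : List Int) (i : Int) (d : Int) (h : 0 ≤ i) :
    PySem.List.pyGetD (z :: s) (i + 1) d = PySem.List.pyGetD s i d := by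
  rw [PySem.List.pyGetD_of_nonneg _ _ (by omega), PySem.List.pyGetD_of_nonneg _ _ h]
  rw [show (i + 1).toNat = i.toNat + 1 by omega]
  rfl

theorem pv_rowScan_shift (z : Int) (s : List Int) :
    ∀ (is : List Int), (∀ i ∈ is, 0 ≤ i) →
      rowScan (z :: s) (is.map (fun i => i + 1)) = rowScan s is := by
  intro is
  induction is with
  | nil => intro _; rfl
  | cons i is ih =>
    intro h
    have hi : 0 ≤ i := h i (by simp)
    simp only [List.map_cons, rowScan]
    rw [pv_pyGetD_cons_succ _ _ _ _ hi, pv_pyGetD_cons_succ _ _ _ _ (by omega)]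
    rw [ih (fun j hj => h j (by simp [hj]))]

-- A's second loop over the sums list is the all-equal-to-head test
theorem pv_rowScan_range :
    ∀ (xs : List Int) (x : Int),
      rowScan (x :: xs) (PySem.List.pyRange 0 (xs.length : Int) 1) = xs.all (fun y => y == x) := by
  intro xs
  induction xs with
  | nil => intro x; rw [PySem.List.pyRange_one_eq_nil (by simp)]; rfl
  | cons y t ih =>
    intro x
    rw [PySem.List.pyRange_one_cons (by exact_mod_cast Nat.succ_pos t.length)]
    have hshift : PySem.List.pyRange (0 + 1) ((y :: t).length : Int) 1
        = (PySem.List.pyRange 0 (t.length : Int) 1).map (fun i => i + 1) := by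
      rw [PySem.List.pyRange_one, PySem.List.pyRange_one, List.map_map]
      rw [show (((y :: t).length : Int) - (0 + 1)).toNat = t.length by simp,
          show ((t.length : Int) - 0).toNat = t.length by simp]
      exact List.map_congr_left (fun k _ => by simp; ring)
    simp only [rowScan]
    rw [hshift, pv_rowScan_shift x (y :: t) _
          (fun i hi => (PySem.List.mem_pyRange_one.mp hi).1)]
    rw [PySem.List.pyGetD_zero_cons, pv_pyGetD_cons_succ x (y :: t) 0 0 le_rfl,
        PySem.List.pyGetD_zero_cons, ih y]
    by_cases h : x = y
    · subst h; simp
    · simp [List.all_cons, beq_iff_eq, h, Ne.symm h]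

theorem pv_altGo (t : Int) (w : Nat) :
    ∀ (rows : List (List Int)),
      altGo t (w : Int) rows = (rows.map (fun row => (row.take w).sum)).all (fun y => y == t) := by
  intro rows
  induction rows with
  | nil => rfl
  | cons row rest ih =>
    simp only [altGo, PySem.List.slice_to_natCast, List.map_cons, List.all_cons,
      ← List.sum_eq_foldl, ih]
    by_cases h : (row.take w).sum = t
    · simp [h]
    · simp [h]

-- ===== VERDICT (by name: the statement is the Claim_ definition above) =====
theorem row_sum_check_spec : Claim_equal_row_sum_check := by
  intro data _ hpre
  obtain ⟨hne, hall⟩ := hpre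
  cases data with
  | nil => exact absurd rfl hne
  | cons d rest =>
    have hall' : ∀ row ∈ (d :: rest), d.length ≤ row.length := by
      simpa using hall
    unfold Spec_row_sum_check row_sum_check row_sum_check_alt
    simp only [PySem.List.pyGetD_zero_cons, PySem.List.slice_from_one, List.tail_cons,
      Int.toNat_natCast]
    rw [PySem.List.foldl_pyRange_zero_pyGetD' (d :: rest) ([] : List Int)
          (fun (st : List Int × Int) row =>
            let st :=
              (PySem.List.pyRange 0 ((d.length : Int)) 1).foldl
                (fun (st : List Int × Int) c =>
                  (PySem.List.pySetD st.1 st.2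
                     (PySem.List.pyGetD st.1 st.2 0 + PySem.List.pyGetD row c 0), st.2)) st
            (st.1, st.2 + 1))
          (List.replicate (d :: rest).length 0, (0 : Int))]
    have hout := pv_outer d.length (d :: rest) [] hall'
    simp only [List.nil_append, List.length_nil, Nat.cast_zero, Nat.zero_add] at hout
    rw [hout]
    have hlen : ((((d :: rest).map (fun row => (row.take d.length).sum)).length : Int) - 1)
        = (((rest.map (fun row => (row.take d.length).sum)).length : Nat) : Int) := by simp
    rw [hlen, List.map_cons, List.take_length, pv_rowScan_range, pv_altGo, ← List.sum_eq_foldl]
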